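-- pv_equiv track=rewrite | github.com/mcdelaney/dcs-wp-magic | dcs/coords/wp_ctrl.py | coord_to_keys
-- ===== SOURCE A (Python) =====
-- def coord_to_keys(coord):
--     out = []
--     for char in ''.join(coord):
--         if char == 'N':
--             out.append('2')
--         elif char == 'S':
--             out.append('8')
--         elif char == 'E':
--             out.append('6')
--         elif char == 'W':
--             out.append('4')
--         elif char == '.':
--             continue
--         else:
--             out.append(f"{char}")
--         if len(out) == 7:
--             out.append("ENT")
--     out.append("ENT")
--     return out
-- ===== SOURCE B (Python) =====
-- def coord_to_keys(coord):
--     s = ''.join(coord)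
--     tr = str.maketrans('NSEW', '2864', '.')
--     # scan the RAW stream for the position right after the 7th key character
--     seen = 0
--     k = len(s)
--     for i, ch in enumerate(s):
--         if ch != '.':
--             seen += 1
--             if seen == 7:
--                 k = i + 1
--                 break
--     # translate the two raw segments independently and splice
--     head = list(s[:k].translate(tr))
--     tail = list(s[k:].translate(tr))
--     if seen == 7:
--         return head + ['ENT'] + tail + ['ENT']
--     return head + ['ENT']
-- ===== Notes on version B (the rewrite author's own statement) =====
-- stated objective: alternative
-- what changed: Instead of translating in one loop with an in-loop length==7 check, B scans the raw joined string only for the position just past the 7th key character, then translates the two raw segments with C-level str.translate (which also deletes '.') and splices 'ENT' between them and at the end.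
import Mathlib
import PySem

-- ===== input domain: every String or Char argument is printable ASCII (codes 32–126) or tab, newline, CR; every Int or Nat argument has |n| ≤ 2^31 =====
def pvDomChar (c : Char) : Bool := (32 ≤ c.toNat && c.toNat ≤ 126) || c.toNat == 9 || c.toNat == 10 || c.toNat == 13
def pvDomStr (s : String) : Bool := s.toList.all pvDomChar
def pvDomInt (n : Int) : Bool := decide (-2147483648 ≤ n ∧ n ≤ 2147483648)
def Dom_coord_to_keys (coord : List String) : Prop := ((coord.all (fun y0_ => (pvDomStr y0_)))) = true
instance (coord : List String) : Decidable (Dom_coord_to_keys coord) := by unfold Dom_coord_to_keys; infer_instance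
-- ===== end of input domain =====

-- B replaces A's translate-as-you-go loop with an in-loop length==7 check by a scan of the
-- raw stream for the 7th key position, two independent segment translations, and a splice
-- (objective: alternative).

-- ===== PORT A =====
-- one iteration of A's for-loop body (branch chain, then the length==7 check)
def pvStepA (out : List String) (c : Char) : List String :=
  let out' :=
    if c = 'N' then out ++ ["2"]
    else if c = 'S' then out ++ ["8"]
    else if c = 'E' then out ++ ["6"]
    else if c = 'W' then out ++ ["4"]
    else if c = '.' then out
    else out ++ [String.mk [c]]
  if out'.length = 7 then out' ++ ["ENT"] else out'

def coord_to_keys (coord : List String) : List String :=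
  ((coord.flatMap String.toList).foldl pvStepA []) ++ ["ENT"]

-- ===== PORT B =====
-- the character translation of Source B's str.translate table (NSEW → 2864, '.' deleted)
def pvMapGet (c : Char) : String :=
  if c = 'N' then "2"
  else if c = 'S' then "8"
  else if c = 'E' then "6"
  else if c = 'W' then "4"
  else String.mk [c]

-- list(seg.translate(tr)) of Source B: delete '.', map the table
def pvTr (cs : List Char) : List String := (cs.filter (· ≠ '.')).map pvMapGet

-- Source B's scan loop: returns (seen, k); k = index just past the 7th non-'.' char, else len
def pvScan : List Char → Nat → Nat → Nat → Nat × Nat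
  | [], _, seen, len => (seen, len)
  | c :: rest, i, seen, len =>
    if c ≠ '.' then
      if seen + 1 = 7 then (7, i + 1)
      else pvScan rest (i + 1) (seen + 1) len
    else pvScan rest (i + 1) seen len

def coord_to_keys_alt (coord : List String) : List String :=
  let s := coord.flatMap String.toList
  let r := pvScan s 0 0 s.length
  let head := pvTr (s.take r.2)
  let tail := pvTr (s.drop r.2)
  if r.1 = 7 then head ++ ["ENT"] ++ tail ++ ["ENT"] else head ++ ["ENT"]

-- ===== PRECONDITION & SPEC =====
def Spec_coord_to_keys (coord : List String) (out : List String) : Prop := out = coord_to_keys_alt coord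
instance (coord : List String) (out : List String) : Decidable (Spec_coord_to_keys coord out) := by unfold Spec_coord_to_keys; infer_instance

-- ===== CLAIM (what is proved, stated in full; the proofs are below) =====
def Claim_equal_coord_to_keys : Prop := ∀ (coord : List String), Dom_coord_to_keys coord → Spec_coord_to_keys coord (coord_to_keys coord)

-- ===== LEMMAS AND PROOFS =====

-- keys contributed by one char
def pvTd (c : Char) : List String := if c = '.' then [] else [pvMapGet c]

lemma pvTd_len (c : Char) : (pvTd c).length ≤ 1 := by
  unfold pvTd; split <;> simp

lemma pvTr_cons (c : Char) (cs : List Char) :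
    pvTr (c :: cs) = pvTd c ++ pvTr cs := by
  by_cases h : c = '.' <;> simp [pvTr, pvTd, h]

lemma pvTr_append (as bs : List Char) : pvTr (as ++ bs) = pvTr as ++ pvTr bs := by
  simp [pvTr]

-- number of key chars in a raw segment
def pvCnt (cs : List Char) : Nat := (cs.filter (· ≠ '.')).length

lemma pvTr_len (cs : List Char) : (pvTr cs).length = pvCnt cs := by
  simp [pvTr, pvCnt]

-- one step of A equals: append this char's translation, then the ==7 check
lemma pvStepA_eq (out : List String) (c : Char) :
    pvStepA out c =
      if (out ++ pvTd c).length = 7 then out ++ pvTd c ++ ["ENT"] else out ++ pvTd c := by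
  by_cases h1 : c = 'N' <;> by_cases h2 : c = 'S' <;> by_cases h3 : c = 'E' <;>
    by_cases h4 : c = 'W' <;> by_cases h5 : c = '.' <;>
    simp_all [pvStepA, pvTd, pvMapGet]

-- once the accumulator has length ≥ 8, the ==7 check never fires again
lemma pvFold_big : ∀ (cs : List Char) (acc : List String), 8 ≤ acc.length →
    cs.foldl pvStepA acc = acc ++ pvTr cs := by
  intro cs
  induction cs with
  | nil => intro acc _; simp [pvTr]
  | cons c cs ih =>
    intro acc hacc
    rw [List.foldl_cons, pvStepA_eq, pvTr_cons]
    have h7 : ¬ (acc ++ pvTd c).length = 7 := by simp; omega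
    rw [if_neg h7, ih _ (by simp; omega)]
    simp

-- while the accumulator is a short prefix, folding computes the splice
lemma pvFold_small : ∀ (cs : List Char) (acc : List String), acc.length < 7 →
    cs.foldl pvStepA acc =
      if 7 ≤ (acc ++ pvTr cs).length then
        (acc ++ pvTr cs).take 7 ++ ["ENT"] ++ (acc ++ pvTr cs).drop 7
      else acc ++ pvTr cs := by
  intro cs
  induction cs with
  | nil =>
    intro acc hacc
    have h : ¬ 7 ≤ acc.length := by omega
    simp [pvTr, h]
  | cons c cs ih =>
    intro acc hacc
    rw [List.foldl_cons, pvStepA_eq, pvTr_cons]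
    by_cases h7 : (acc ++ pvTd c).length = 7
    · have h8 : 8 ≤ (acc ++ pvTd c ++ ["ENT"]).length := by simp at h7 ⊢; omega
      have h7' : 7 ≤ (acc ++ (pvTd c ++ pvTr cs)).length := by simp at h7 ⊢; omega
      rw [if_pos h7, pvFold_big cs _ h8, if_pos h7', ← List.append_assoc,
          List.take_append_of_le_length (le_of_eq h7.symm),
          List.drop_append_of_le_length (le_of_eq h7.symm)]
      simp [List.take_of_length_le (le_of_eq h7), List.drop_of_length_le (le_of_eq h7)]
    · have hlt : (acc ++ pvTd c).length < 7 := by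
        have := pvTd_len c; simp at h7 ⊢; omega
      rw [if_neg h7, ih _ hlt]
      simp only [List.append_assoc]

-- the scan loop: either it ran off the end having seen fewer than 7 keys,
-- or it stopped just past the 7th key of the remaining stream
lemma pvScan_spec : ∀ (cs : List Char) (i seen len : Nat), seen < 7 →
    (seen + pvCnt cs < 7 ∧ pvScan cs i seen len = (seen + pvCnt cs, len)) ∨
    (∃ k, pvScan cs i seen len = (7, i + k) ∧ seen + pvCnt (cs.take k) = 7) := by
  intro cs
  induction cs with
  | nil =>
    intro i seen len hs
    left; exact ⟨by simp [pvCnt]; omega, by simp [pvScan, pvCnt]⟩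
  | cons c cs ih =>
    intro i seen len hs
    by_cases hc : c = '.'
    · have hcnt : pvCnt (c :: cs) = pvCnt cs := by simp [pvCnt, hc]
      rcases ih (i + 1) seen len hs with ⟨h1, h2⟩ | ⟨k, h1, h2⟩
      · left
        refine ⟨by omega, ?_⟩
        rw [show pvCnt cs = pvCnt (c :: cs) from hcnt.symm] at h2; simp [pvScan, hc, h2]
      · right
        refine ⟨k + 1, ?_, ?_⟩
        · simp [pvScan, hc, h1]; omega
        · simpa [pvCnt, hc] using h2
    · have hcnt : pvCnt (c :: cs) = pvCnt cs + 1 := by simp [pvCnt, hc]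
      by_cases h7 : seen + 1 = 7
      · right
        refine ⟨1, ?_, ?_⟩
        · simp [pvScan, hc, h7]
        · simp [pvCnt, hc]; omega
      · rcases ih (i + 1) (seen + 1) len (by omega) with ⟨h1, h2⟩ | ⟨k, h1, h2⟩
        · left
          refine ⟨by omega, ?_⟩
          simp [pvScan, hc, h7, h2, hcnt]; omega
        · right
          refine ⟨k + 1, ?_, ?_⟩
          · simp [pvScan, hc, h7, h1]; omega
          · have := h2; simp [pvCnt, hc] at this ⊢; omega

-- ===== VERDICT (by name: the statement is the Claim_ definition above) =====
theorem coord_to_keys_spec : Claim_equal_coord_to_keys := by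
  intro coord _
  unfold Spec_coord_to_keys coord_to_keys coord_to_keys_alt
  set s := coord.flatMap String.toList with hsdef
  rw [pvFold_small s [] (by simp)]
  simp only [List.nil_append]
  rcases pvScan_spec s 0 0 s.length (by omega) with ⟨h1, h2⟩ | ⟨k, h1, h2⟩
  · simp only [h2]
    have hlen : (pvTr s).length < 7 := by rw [pvTr_len]; omega
    rw [if_neg (by omega), if_neg (by omega)]
    simp [pvTr]
  · simp only [h1, Nat.zero_add]
    have hsplit : pvTr s = pvTr (s.take k) ++ pvTr (s.drop k) := by
      rw [← pvTr_append, List.take_append_drop]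
    have hhead : (pvTr (s.take k)).length = 7 := by rw [pvTr_len]; omega
    have hlen : 7 ≤ (pvTr s).length := by rw [hsplit]; simp [hhead]
    rw [if_pos hlen, if_pos (by simp), hsplit,
        List.take_append_of_le_length (le_of_eq hhead.symm),
        List.drop_append_of_le_length (le_of_eq hhead.symm),
        List.take_of_length_le (le_of_eq hhead), List.drop_of_length_le (le_of_eq hhead)]
    simp
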